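-- pv_equiv track=rewrite | github.com/imanuch/dcdl | des chiffres et des lettres.py | jeu
-- ===== SOURCE A (Python) =====
-- def jeu(list,st):
--     if len(st)>len(list):
--         return False
--
--     for i in range(len(st)):
--         if st[i]!= ' ':
--             if st.count(st[i])>list.count(st[i]):
--                 return False
--     return True
-- ===== SOURCE B (Python) =====
-- def jeu(list, st):
--     # length guard kept verbatim (it counts spaces, like A's)
--     if len(st) > len(list):
--         return False
--     need = sorted(c for c in st if c != ' ')
--     have = sorted(list)
--     # greedy two-pointer subsequence scan: on sorted sequences this
--     # decides multiset containment (each needed letter matched once)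
--     i = 0
--     for c in have:
--         if i < len(need) and need[i] == c:
--             i += 1
--     return i == len(need)
-- ===== Notes on version B (the rewrite author's own statement) =====
-- stated objective: faster
-- what changed: Replaces A's per-position recount of st.count(c) vs list.count(c) with sort-both-then-greedy-two-pointer multiset containment: the non-space letters of st and the letters of list are sorted once and scanned once in parallel.
import Mathlib
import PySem

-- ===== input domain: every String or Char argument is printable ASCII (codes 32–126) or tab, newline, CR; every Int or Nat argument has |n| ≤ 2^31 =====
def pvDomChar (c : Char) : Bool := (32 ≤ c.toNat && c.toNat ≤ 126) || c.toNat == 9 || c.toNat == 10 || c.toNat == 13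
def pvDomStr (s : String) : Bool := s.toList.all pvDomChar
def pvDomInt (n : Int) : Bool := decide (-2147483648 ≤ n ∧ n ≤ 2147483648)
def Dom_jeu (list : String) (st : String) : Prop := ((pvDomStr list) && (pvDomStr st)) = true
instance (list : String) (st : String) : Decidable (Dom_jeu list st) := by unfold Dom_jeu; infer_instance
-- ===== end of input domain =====

-- B replaces A's per-position recount (st.count(c) vs list.count(c)) by sorting st's
-- non-space letters and list's letters and running one greedy two-pointer scan.
-- Equivalence of the RETURN value; neither program mutates its arguments.

-- ===== PORT A =====
-- 'for i in range(len(st)): st[i]' enumerates st's characters in order; st.count / list.count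
-- with a single-character needle is the character count (exact on every input).
def jeuLoopA (l full : List Char) : List Char → Bool
  | [] => true
  | c :: cs =>
    if c ≠ ' ' then
      if full.count c > l.count c then false else jeuLoopA l full cs
    else jeuLoopA l full cs

def jeu (list : String) (st : String) : Bool :=
  if st.toList.length > list.toList.length then false
  else jeuLoopA list.toList st.toList st.toList

-- ===== PORT B =====
-- 'for c in have: if i < len(need) and need[i] == c: i += 1' — the greedy scan as a fold
-- over have with the pointer i as accumulator; need[i] (guarded, in range) is getD.
def jeuScanB (need : List Char) (haveL : List Char) : Nat :=
  haveL.foldl (fun i c => if i < need.length ∧ need.getD i ' ' = c then i + 1 else i) 0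

def jeu_alt (list : String) (st : String) : Bool :=
  if st.toList.length > list.toList.length then false
  else
    let need := PySem.List.sorted (st.toList.filter (fun c => c ≠ ' ')) (fun c => c) false
    let haveL := PySem.List.sorted list.toList (fun c => c) false
    jeuScanB need haveL == need.length

-- ===== PRECONDITION & SPEC =====
def Spec_jeu (list : String) (st : String) (out : Bool) : Prop := out = jeu_alt list st
instance (list : String) (st : String) (out : Bool) : Decidable (Spec_jeu list st out) := by unfold Spec_jeu; infer_instance

-- ===== CLAIM (what is proved, stated in full; the proofs are below) =====
def Claim_equal_jeu : Prop := ∀ (list : String) (st : String), Dom_jeu list st → Spec_jeu list st (jeu list st)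

-- ===== LEMMAS AND PROOFS =====

-- the recursive two-pointer greedy check (proof-side reformulation of jeuScanB)
def greedySub : List Char → List Char → Bool
  | [], _ => true
  | _ :: _, [] => false
  | a :: as, b :: bs => if a = b then greedySub as bs else greedySub (a :: as) bs

-- the fold from pointer i decides greedy containment of need.drop i
lemma jeuScanB_drop (need : List Char) : ∀ (haveL : List Char) (i : Nat), i ≤ need.length →
    ((haveL.foldl (fun i c => if i < need.length ∧ need.getD i ' ' = c then i + 1 else i) i
       = need.length) ↔ greedySub (need.drop i) haveL = true) := by
  intro haveL
  induction haveL with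
  | nil =>
    intro i hi
    simp only [List.foldl_nil]
    cases Nat.lt_or_ge i need.length with
    | inl h =>
      have hdrop : need.drop i ≠ [] := by
        simp [List.drop_eq_nil_iff]; omega
      cases hd : need.drop i with
      | nil => exact absurd hd hdrop
      | cons a as => simp [greedySub]; omega
    | inr h =>
      have : i = need.length := le_antisymm hi h
      subst this
      simp [List.drop_length, greedySub]
  | cons c cs ih =>
    intro i hi
    simp only [List.foldl_cons]
    by_cases hcond : i < need.length ∧ need.getD i ' ' = c
    · obtain ⟨hlt, heq⟩ := hcond
      have hget : need.getD i ' ' = need[i] := List.getD_eq_getElem need ' ' hlt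
      have hdrop : need.drop i = need[i] :: need.drop (i + 1) :=
        List.drop_eq_getElem_cons hlt
      rw [if_pos ⟨hlt, heq⟩, ih (i + 1) hlt, hdrop]
      rw [hget] at heq; rw [heq]
      simp [greedySub]
    · rw [if_neg hcond, ih i hi]
      cases Nat.lt_or_ge i need.length with
      | inl h =>
        have hdrop : need.drop i = need[i] :: need.drop (i + 1) :=
          List.drop_eq_getElem_cons h
        have hne : need[i] ≠ c := by
          intro hc
          exact hcond ⟨h, by rw [List.getD_eq_getElem need ' ' h, hc]⟩
        rw [hdrop]
        simp [greedySub, hne]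
      | inr h =>
        have : i = need.length := le_antisymm hi h
        subst this
        simp [List.drop_length, greedySub]

-- the greedy scan is the subsequence (sublist) test — for arbitrary lists
lemma greedySub_iff_sublist : ∀ (need haveL : List Char),
    greedySub need haveL = true ↔ List.Sublist need haveL := by
  intro need haveL
  induction haveL generalizing need with
  | nil =>
    cases need with
    | nil => simp [greedySub]
    | cons a as => simp [greedySub]
  | cons b bs ih =>
    cases need with
    | nil => simp [greedySub]
    | cons a as =>
      by_cases hab : a = b
      · subst hab
        show (if a = a then greedySub as bs else greedySub (a :: as) bs) = true ↔ _
        rw [if_pos rfl, ih]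
        exact (List.cons_sublist_cons).symm
      · simp only [greedySub, if_neg hab, ih]
        constructor
        · intro h; exact h.cons b
        · intro h
          cases h with
          | cons _ h' => exact h'
          | cons₂ => exact absurd rfl hab

-- on sorted lists, sublist = count-wise containment
lemma sorted_sublist_iff_counts (xs ys : List Char)
    (hx : xs.Pairwise (fun a b => a ≤ b)) (hy : ys.Pairwise (fun a b => a ≤ b)) :
    List.Sublist xs ys ↔ ∀ c, xs.count c ≤ ys.count c := by
  constructor
  · intro h c; exact h.count_le c
  · intro h
    refine List.sublist_of_subperm_of_pairwise ?_ hx hy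
    refine List.subperm_ext_iff.mpr ?_
    intro a _; exact h a

lemma jeuLoopA_iff (l full : List Char) : ∀ (rem : List Char),
    jeuLoopA l full rem = true ↔ ∀ c ∈ rem, c ≠ ' ' → full.count c ≤ l.count c := by
  intro rem
  induction rem with
  | nil => simp [jeuLoopA]
  | cons c cs ih =>
    by_cases hc : c = ' '
    · simp [jeuLoopA, hc, ih]
    · by_cases hcnt : full.count c > l.count c
      · simp only [jeuLoopA, if_pos (by exact hc), if_pos hcnt]
        constructor
        · intro h; exact absurd h (by simp)
        · intro h; exact absurd (h c (List.mem_cons_self) hc) (by omega)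
      · simp only [jeuLoopA, if_pos (by exact hc), if_neg hcnt, ih]
        constructor
        · intro h d hd hds
          rcases List.mem_cons.mp hd with rfl | hd'
          · omega
          · exact h d hd' hds
        · intro h d hd hds; exact h d (List.mem_cons_of_mem c hd) hds

-- A's loop condition, phrased over the non-space letters of st
lemma jeu_cond_iff (l full : List Char) :
    (∀ c ∈ full, c ≠ ' ' → full.count c ≤ l.count c) ↔
    (∀ c, (full.filter (fun x => x ≠ ' ')).count c ≤ l.count c) := by
  constructor
  · intro h c
    have hsub : (full.filter (fun x => x ≠ ' ')).count c ≤ full.count c :=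
      (List.filter_sublist ..).count_le c
    by_cases hc : c = ' '
    · have h0 : (full.filter (fun x => x ≠ ' ')).count c = 0 := by
        simp [List.count_eq_zero, List.mem_filter, hc]
      omega
    · by_cases hm : c ∈ full
      · have := h c hm hc
        omega
      · have h0 : full.count c = 0 := List.count_eq_zero_of_not_mem hm
        omega
  · intro h c hm hc
    have heq : (full.filter (fun x => x ≠ ' ')).count c = full.count c :=
      List.count_filter (by simp [hc])
    have := h c
    omega

-- B's result on the non-guard branch, reduced to the count condition
lemma jeu_alt_iff_counts (xs ys : List Char) :
    (jeuScanB (PySem.List.sorted xs (fun c => c) false)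
              (PySem.List.sorted ys (fun c => c) false)
       == (PySem.List.sorted xs (fun c => c) false).length) = true ↔
    ∀ c, xs.count c ≤ ys.count c := by
  set need := PySem.List.sorted xs (fun c => c) false with hneed
  set haveL := PySem.List.sorted ys (fun c => c) false with hhave
  have hpx : need.Pairwise (fun a b => a ≤ b) := by
    have := PySem.List.sorted_pairwise xs (fun c => c)
    simpa using this
  have hpy : haveL.Pairwise (fun a b => a ≤ b) := by
    have := PySem.List.sorted_pairwise ys (fun c => c)
    simpa using this
  have hperm_x : need.Perm xs := PySem.List.sorted_perm ..
  have hperm_y : haveL.Perm ys := PySem.List.sorted_perm ..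
  rw [beq_iff_eq]
  rw [show jeuScanB need haveL = haveL.foldl
        (fun i c => if i < need.length ∧ need.getD i ' ' = c then i + 1 else i) 0 from rfl]
  rw [jeuScanB_drop need haveL 0 (Nat.zero_le _), List.drop_zero,
      greedySub_iff_sublist, sorted_sublist_iff_counts need haveL hpx hpy]
  constructor
  · intro h c
    rw [← hperm_x.count_eq c, ← hperm_y.count_eq c]; exact h c
  · intro h c
    rw [hperm_x.count_eq c, hperm_y.count_eq c]; exact h c

-- ===== VERDICT (by name: the statement is the Claim_ definition above) =====
theorem jeu_spec : Claim_equal_jeu := by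
  intro list st _
  unfold Spec_jeu jeu jeu_alt
  by_cases hlen : st.toList.length > list.toList.length
  · simp only [if_pos hlen]
  · simp only [if_neg hlen]
    rw [Bool.eq_iff_iff, jeuLoopA_iff, jeu_cond_iff,
        jeu_alt_iff_counts (st.toList.filter (fun c => c ≠ ' ')) list.toList]
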